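-- pv_equiv track=rewrite | github.com/google/google-ctf | 2025/quals/rev-cgb/solution.py | do_feistel_algorithm
-- ===== SOURCE A (Python) =====
-- from typing import Tuple
--
-- def do_feistel_algorithm(flag_bytes, key, decrypt: bool = False) -> list:
--     # Split the encrypted flag by groups of 2 bytes each.
--     # We'll decrypt them by chunks.
--     new_bytes = []
--     it = iter(flag_bytes)
--     i = 0
--     for L, R in zip(it, it):
--         if decrypt:
--             new_r, new_l = feistel(R, L, key[i])
--         else:
--             new_l, new_r = feistel(L, R, key[i])
--         new_bytes.append(new_l)
--         new_bytes.append(new_r)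
--         i+=1
--
--     return new_bytes
--
-- def feistel(left: int, right: int, key: list) -> Tuple[int, int]:
--     for i in range(16):
--         subkey = get_subkey(i, key)
--         left, right = do_round(left, right, subkey)
--     return (left, right)
--
-- def do_round(left: int, right: int, subkey: int) -> Tuple[int, int]:
--     return (right, left ^ f(right, subkey))
--
-- def f(b: int, k: int) -> int:
--     # Check the least significant bit in the key, if it's not set then rotate 'b' to the left.
--     # If it's set then rotate to the right.
--     for _ in range(8):
--         if (k & 1) == 0:
--             bit0_b = b & 1
--             b = (b >> 1) | (bit0_b << 7)
--         else:
--             bit7_b = (b >> 7) & 1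
--             b = (b << 1) & 0xFF
--             b |= bit7_b
--         k >>= 1
--     return b
--
-- def get_subkey(i: int, key: list) -> int:
--     return key[i % 4]
-- ===== SOURCE B (Python) =====
-- # B: per pair, precompute each subkey's net rotation once (popcount loop), then run the
-- # 16 Feistel rounds with a closed-form byte rotation instead of A's 8-step bit loop.
--
-- def _rot_amount(k):
--     c = 0
--     for _ in range(8):
--         c += k & 1
--         k >>= 1
--     return (2 * c) % 8
--
-- def _rotl(b, r):
--     return ((b << r) | (b >> (8 - r))) & 0xFF
--
-- def do_feistel_algorithm(flag_bytes, key, decrypt: bool = False) -> list: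
--     new_bytes = []
--     it = iter(flag_bytes)
--     for i, (a, b) in enumerate(zip(it, it)):
--         rots = [_rot_amount(key[i][j]) for j in range(4)]
--         l, r = (b, a) if decrypt else (a, b)
--         for j in range(16):
--             l, r = r, l ^ _rotl(r, rots[j % 4])
--         new_bytes.extend((r, l) if decrypt else (l, r))
--     return new_bytes
-- ===== Notes on version B (the rewrite author's own statement) =====
-- stated objective: faster
-- what changed: The per-round helper f's 8-iteration bit-by-bit rotate loop is replaced by computing each subkey's net rotation amount once per pair (popcount of the low 8 key bits, r = 2*c mod 8) and applying a closed-form byte rotation in every round.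
-- outside the precondition, e.g. on do_feistel_algorithm([300, -5], [[1, 2, 3, 4]], False): A returns [397, -15], B returns [300, -5]; on do_feistel_algorithm([1, 2], [[1], [2]], False): A raises IndexError, B raises IndexError
import Mathlib
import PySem

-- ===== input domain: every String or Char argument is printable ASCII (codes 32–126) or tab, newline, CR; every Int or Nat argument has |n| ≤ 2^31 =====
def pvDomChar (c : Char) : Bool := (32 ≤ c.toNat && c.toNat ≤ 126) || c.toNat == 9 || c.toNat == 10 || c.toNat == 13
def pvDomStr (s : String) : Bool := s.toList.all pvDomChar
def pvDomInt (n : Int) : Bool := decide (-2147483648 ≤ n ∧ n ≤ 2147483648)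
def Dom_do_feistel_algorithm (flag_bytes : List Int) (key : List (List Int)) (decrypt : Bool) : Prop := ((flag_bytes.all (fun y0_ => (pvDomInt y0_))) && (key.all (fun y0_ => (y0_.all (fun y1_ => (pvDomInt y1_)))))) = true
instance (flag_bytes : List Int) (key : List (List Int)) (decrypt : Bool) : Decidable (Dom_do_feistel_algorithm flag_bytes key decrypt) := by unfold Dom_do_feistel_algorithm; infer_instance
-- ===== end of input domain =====

-- B precomputes each subkey's net rotation (popcount) once per pair and replaces A's
-- 8-step bit-rotation loop in `f` by a closed-form byte rotation; same 16-round Feistel.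


-- ===== PORT A =====

-- f: 8 iterations, rotate right when the key bit is clear, rotate left (masked) when set
def pyF_go : Nat → Int → Int → Int
  | 0, b, _ => b
  | n+1, b, k =>
      pyF_go n
        (if PySem.Int.band k 1 == 0 then
          PySem.Int.bor (b >>> 1) ((PySem.Int.band b 1) <<< 7)
        else
          PySem.Int.bor (PySem.Int.band (b <<< 1) 255) (PySem.Int.band (b >>> 7) 1))
        (k >>> 1)

def pyF (b k : Int) : Int := pyF_go 8 b k

def do_round (l r subkey : Int) : Int × Int := (r, PySem.Int.bxor l (pyF r subkey))

-- key[i % 4]; in bounds whenever Pre_ holds (Python raises IndexError otherwise)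
def get_subkey (i : Int) (key : List Int) : Int :=
  PySem.List.pyGetD key (PySem.Int.mod i 4) 0

def feistel (l r : Int) (key : List Int) : Int × Int :=
  (PySem.List.pyRange 0 16 1).foldl (fun p i => do_round p.1 p.2 (get_subkey i key)) (l, r)

-- the zip(it, it) pairing loop with running index i; key[i] in bounds under Pre_
def goA : Nat → List Int → List (List Int) → Bool → List Int
  | i, lL :: rR :: rest, key, d =>
      (if d then
        let p := feistel rR lL (key.getD i [])
        [p.2, p.1]
      else
        let p := feistel lL rR (key.getD i [])
        [p.1, p.2]) ++ goA (i+1) rest key d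
  | _, _, _, _ => []

def do_feistel_algorithm (flag_bytes : List Int) (key : List (List Int)) (decrypt : Bool) : List Int :=
  goA 0 flag_bytes key decrypt

-- ===== PORT B =====

-- popcount-style loop: c accumulates k & 1 over 8 shifts
def rot_amount_go : Nat → Int → Int → Int
  | 0, c, _ => c
  | n+1, c, k => rot_amount_go n (c + PySem.Int.band k 1) (k >>> 1)

def rot_amount (k : Int) : Int := PySem.Int.mod (2 * rot_amount_go 8 0 k) 8

-- closed-form byte rotation ((b << r) | (b >> (8 - r))) & 0xFF; r, 8-r are provably ≥ 0 so .toNat is exact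
def rotl (b r : Int) : Int :=
  PySem.Int.band (PySem.Int.bor (b <<< r.toNat) (b >>> (8 - r).toNat)) 255

def roundsB (l r : Int) (rots : List Int) : Int × Int :=
  (PySem.List.pyRange 0 16 1).foldl
    (fun p j => (p.2, PySem.Int.bxor p.1 (rotl p.2 (PySem.List.pyGetD rots (PySem.Int.mod j 4) 0)))) (l, r)

-- same zip(it, it) pairing loop; key[i][j] in bounds under Pre_
def goB : Nat → List Int → List (List Int) → Bool → List Int
  | i, a :: b :: rest, key, d =>
      let rots := (List.range 4).map (fun (j : Nat) => rot_amount (PySem.List.pyGetD (key.getD i []) (j : Int) 0))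
      let lr := if d then (b, a) else (a, b)
      let p := roundsB lr.1 lr.2 rots
      (if d then [p.2, p.1] else [p.1, p.2]) ++ goB (i+1) rest key d
  | _, _, _, _ => []

def do_feistel_algorithm_alt (flag_bytes : List Int) (key : List (List Int)) (decrypt : Bool) : List Int :=
  goB 0 flag_bytes key decrypt

-- ===== PRECONDITION & SPEC =====
-- Pre_ restricts to the cipher's natural domain: every paired input value is a byte (0..255) —
-- A still returns on other ints but its unmasked right-rotate arithmetic then leaves the byte
-- range (implementation garbage no reimplementation would match) — and it excludes the
-- IndexError inputs (fewer key rows than pairs, or a key row shorter than 4).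
def Pre_do_feistel_algorithm (flag_bytes : List Int) (key : List (List Int)) (decrypt : Bool) : Prop :=
  ∀ i < flag_bytes.length / 2,
    (0 ≤ flag_bytes.getD (2*i) 0 ∧ flag_bytes.getD (2*i) 0 < 256 ∧
     0 ≤ flag_bytes.getD (2*i+1) 0 ∧ flag_bytes.getD (2*i+1) 0 < 256) ∧
    (i < key.length ∧ 4 ≤ (key.getD i []).length)

instance (flag_bytes : List Int) (key : List (List Int)) (decrypt : Bool) : Decidable (Pre_do_feistel_algorithm flag_bytes key decrypt) := by
  unfold Pre_do_feistel_algorithm; infer_instance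

def pvWitness_do_feistel_algorithm : List Int × List (List Int) × Bool :=
  ([65, 66], [[1, 2, 3, 4]], false)

def Spec_do_feistel_algorithm (flag_bytes : List Int) (key : List (List Int)) (decrypt : Bool) (out : List Int) : Prop := out = do_feistel_algorithm_alt flag_bytes key decrypt
instance (flag_bytes : List Int) (key : List (List Int)) (decrypt : Bool) (out : List Int) : Decidable (Spec_do_feistel_algorithm flag_bytes key decrypt out) := by unfold Spec_do_feistel_algorithm; infer_instance

-- ===== CLAIM (what is proved, stated in full; the proofs are below) =====
def Claim_equal_do_feistel_algorithm : Prop := ∀ (flag_bytes : List Int) (key : List (List Int)) (decrypt : Bool), Dom_do_feistel_algorithm flag_bytes key decrypt → Pre_do_feistel_algorithm flag_bytes key decrypt → Spec_do_feistel_algorithm flag_bytes key decrypt (do_feistel_algorithm flag_bytes key decrypt)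

-- ===== LEMMAS AND PROOFS =====
set_option maxRecDepth 100000

-- Nat-level byte rotation and its facts on the 256-value byte domain (by decide)
def rotN (b r : Nat) : Nat := ((b <<< r) ||| (b >>> (8 - r))) &&& 255

theorem rotN_comp : ∀ b < 256, ∀ r1 < 8, ∀ r2 < 8, rotN (rotN b r1) r2 = rotN b ((r1 + r2) % 8) := by decide
theorem rotN_lt : ∀ b < 256, ∀ r < 8, rotN b r < 256 := by decide
theorem stepR_eq_rotN : ∀ b < 256, (b >>> 1) ||| ((b &&& 1) <<< 7) = rotN b 7 := by decide
theorem stepL_eq_rotN : ∀ b < 256, ((b <<< 1) &&& 255) ||| ((b >>> 7) &&& 1) = rotN b 1 := by decide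
theorem rotN_zero : ∀ b < 256, rotN b 0 = b := by decide

theorem band_one_cases (k : Int) : PySem.Int.band k 1 = 0 ∨ PySem.Int.band k 1 = 1 := by
  have h := PySem.Int.band_one k
  have h1 := PySem.Int.mod_nonneg k (b := 2) (by omega)
  have h2 := PySem.Int.mod_lt k (b := 2) (by omega)
  omega

theorem rot_go_acc (n : Nat) : ∀ (c k : Int), rot_amount_go n c k = c + rot_amount_go n 0 k := by
  induction n with
  | zero => intro c k; simp [rot_amount_go]
  | succ n ih =>
      intro c k
      simp only [rot_amount_go]
      rw [ih (c + PySem.Int.band k 1), ih (0 + PySem.Int.band k 1)]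
      ring

theorem rot_go_bounds (n : Nat) : ∀ (k : Int), 0 ≤ rot_amount_go n 0 k ∧ rot_amount_go n 0 k ≤ n := by
  induction n with
  | zero => intro k; simp [rot_amount_go]
  | succ n ih =>
      intro k
      simp only [rot_amount_go]
      rw [rot_go_acc n (0 + PySem.Int.band k 1)]
      have := ih (k >>> 1)
      rcases band_one_cases k with h | h <;> rw [h] <;> push_cast <;> omega

-- casts between the Int-level bit operations of the ports and their Nat counterparts
theorem castShiftL (m k : Nat) : ((m : Int) <<< k) = ((m <<< k : Nat) : Int) := rfl
theorem castShiftR (m k : Nat) : ((m : Int) >>> k) = ((m >>> k : Nat) : Int) := rfl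
theorem castShiftLC (m k : Nat) : ((m : Int) <<< ((k : Nat) : Int)) = ((m <<< k : Nat) : Int) := by
  simp [Nat.shiftLeft_eq]
theorem castShiftRC (m k : Nat) : ((m : Int) >>> ((k : Nat) : Int)) = ((m >>> k : Nat) : Int) := by
  simp [Nat.shiftRight_eq_div_pow]

theorem rotl_eq (b : Int) (hb0 : 0 ≤ b) (r : Int) (hr0 : 0 ≤ r) (hr : r < 8) :
    rotl b r = ((rotN b.toNat r.toNat : Nat) : Int) := by
  have hb : b = ((b.toNat : Nat) : Int) := (Int.toNat_of_nonneg hb0).symm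
  have h8 : (8 - r).toNat = 8 - r.toNat := by omega
  rw [rotl, rotN, h8, hb]
  rw [castShiftL, castShiftR, PySem.Int.bor_natCast]
  have h255 : (255 : Int) = ((255 : Nat) : Int) := rfl
  rw [h255, PySem.Int.band_natCast]
  simp only [Int.toNat_natCast]

theorem stepR_int (b : Int) (hb0 : 0 ≤ b) (hb : b < 256) :
    PySem.Int.bor (b >>> 1) ((PySem.Int.band b 1) <<< 7) = ((rotN b.toNat 7 : Nat) : Int) := by
  have hbn : b.toNat < 256 := by omega
  have hbc : b = ((b.toNat : Nat) : Int) := (Int.toNat_of_nonneg hb0).symm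
  have h1 : (1 : Int) = ((1 : Nat) : Int) := rfl
  have h7 : (7 : Int) = ((7 : Nat) : Int) := rfl
  rw [hbc, h1, h7, castShiftRC, PySem.Int.band_natCast, castShiftLC, PySem.Int.bor_natCast,
    stepR_eq_rotN b.toNat hbn]
  simp only [Int.toNat_natCast]

theorem stepL_int (b : Int) (hb0 : 0 ≤ b) (hb : b < 256) :
    PySem.Int.bor (PySem.Int.band (b <<< 1) 255) (PySem.Int.band (b >>> 7) 1) = ((rotN b.toNat 1 : Nat) : Int) := by
  have hbn : b.toNat < 256 := by omega
  have hbc : b = ((b.toNat : Nat) : Int) := (Int.toNat_of_nonneg hb0).symm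
  have h1 : (1 : Int) = ((1 : Nat) : Int) := rfl
  have h7 : (7 : Int) = ((7 : Nat) : Int) := rfl
  have h255 : (255 : Int) = ((255 : Nat) : Int) := rfl
  rw [hbc, h1, h7, h255, castShiftRC, castShiftLC, PySem.Int.band_natCast, PySem.Int.band_natCast,
    PySem.Int.bor_natCast, stepL_eq_rotN b.toNat hbn]
  simp only [Int.toNat_natCast]

theorem fgo_eq (n : Nat) : ∀ (k b : Int), 0 ≤ b → b < 256 →
    pyF_go n b k = ((rotN b.toNat ((7*n + 2*(rot_amount_go n 0 k).toNat) % 8) : Nat) : Int) := by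
  induction n with
  | zero =>
      intro k b hb0 hb
      have hbn : b.toNat < 256 := by omega
      simp [pyF_go, rot_amount_go, rotN_zero b.toNat hbn, Int.toNat_of_nonneg hb0]
  | succ n ih =>
      intro k b hb0 hb
      have hbn : b.toNat < 256 := by omega
      have hs' : (7*n + 2*(rot_amount_go n 0 (k >>> 1)).toNat) % 8 < 8 := Nat.mod_lt _ (by omega)
      have hacc := rot_go_acc n (0 + PySem.Int.band k 1) (k >>> 1)
      have hbnd := rot_go_bounds n (k >>> 1)
      simp only [pyF_go]
      rcases band_one_cases k with h | h
      · rw [h]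
        simp only [BEq.rfl, if_pos]
        rw [stepR_int b hb0 hb]
        have h7 : rotN b.toNat 7 < 256 := rotN_lt b.toNat hbn 7 (by omega)
        rw [ih (k >>> 1) _ (by positivity) (by exact_mod_cast h7)]
        simp only [Int.toNat_natCast]
        rw [rotN_comp b.toNat hbn 7 (by omega) _ hs']
        have hgo : rot_amount_go (n+1) 0 k = rot_amount_go n 0 (k >>> 1) := by
          simp only [rot_amount_go]; rw [hacc, h]; ring
        rw [hgo]
        exact congrArg (fun x => ((rotN b.toNat x : Nat) : Int)) (by omega)
      · rw [h]
        have hfalse : ((1 : Int) == 0) = false := by decide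
        rw [hfalse]
        simp only [Bool.false_eq_true, if_false]
        rw [stepL_int b hb0 hb]
        have h1 : rotN b.toNat 1 < 256 := rotN_lt b.toNat hbn 1 (by omega)
        rw [ih (k >>> 1) _ (by positivity) (by exact_mod_cast h1)]
        simp only [Int.toNat_natCast]
        rw [rotN_comp b.toNat hbn 1 (by omega) _ hs']
        have hgo : rot_amount_go (n+1) 0 k = 1 + rot_amount_go n 0 (k >>> 1) := by
          simp only [rot_amount_go]; rw [hacc, h]; ring
        rw [hgo]
        exact congrArg (fun x => ((rotN b.toNat x : Nat) : Int)) (by omega)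

theorem pyF_eq (b k : Int) (hb0 : 0 ≤ b) (hb : b < 256) :
    pyF b k = rotl b (rot_amount k) := by
  have hg := rot_go_bounds 8 k
  have hr0 : 0 ≤ rot_amount k := PySem.Int.mod_nonneg _ (by omega)
  have hr : rot_amount k < 8 := PySem.Int.mod_lt _ (by omega)
  have hmod : rot_amount k = (2 * rot_amount_go 8 0 k) % 8 := by
    rw [rot_amount, PySem.Int.mod_eq_emod_of_pos (by omega)]
  rw [pyF, fgo_eq 8 k b hb0 hb, rotl_eq b hb0 _ hr0 hr]
  have hA : (7*8 + 2*(rot_amount_go 8 0 k).toNat) % 8 = (rot_amount k).toNat := by omega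
  rw [hA]

theorem pyF_bounds (b k : Int) (hb0 : 0 ≤ b) (hb : b < 256) :
    0 ≤ pyF b k ∧ pyF b k < 256 := by
  have hbn : b.toNat < 256 := by omega
  rw [pyF, fgo_eq 8 k b hb0 hb]
  have := rotN_lt b.toNat hbn ((7*8 + 2*(rot_amount_go 8 0 k).toNat) % 8) (Nat.mod_lt _ (by omega))
  omega

theorem bxor_byte (a b : Int) (ha0 : 0 ≤ a) (ha : a < 256) (hb0 : 0 ≤ b) (hb : b < 256) :
    0 ≤ PySem.Int.bxor a b ∧ PySem.Int.bxor a b < 256 := by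
  have hac : a = ((a.toNat : Nat) : Int) := (Int.toNat_of_nonneg ha0).symm
  have hbc : b = ((b.toNat : Nat) : Int) := (Int.toNat_of_nonneg hb0).symm
  rw [hac, hbc, PySem.Int.bxor_natCast]
  have : a.toNat ^^^ b.toNat < 2 ^ 8 := Nat.xor_lt_two_pow (by omega) (by omega)
  omega

theorem rots_get (inner : List Int) (i : Int) :
    PySem.List.pyGetD ((List.range 4).map (fun (j : Nat) => rot_amount (PySem.List.pyGetD inner (j : Int) 0))) (PySem.Int.mod i 4) 0
      = rot_amount (PySem.List.pyGetD inner (PySem.Int.mod i 4) 0) := by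
  have hm0 : 0 ≤ PySem.Int.mod i 4 := PySem.Int.mod_nonneg _ (by omega)
  have hm : PySem.Int.mod i 4 < 4 := PySem.Int.mod_lt _ (by omega)
  have hmc : PySem.Int.mod i 4 = (((PySem.Int.mod i 4).toNat : Nat) : Int) := (Int.toNat_of_nonneg hm0).symm
  rw [hmc, PySem.List.pyGetD_natCast,
    PySem.List.getD_map_range (fun (j : Nat) => rot_amount (PySem.List.pyGetD inner (j : Int) 0)) 4 _ 0 (by omega)]

theorem fold_eq (inner : List Int) (is : List Int) : ∀ (l r : Int),
    0 ≤ l → l < 256 → 0 ≤ r → r < 256 →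
    is.foldl (fun p i => do_round p.1 p.2 (get_subkey i inner)) (l, r)
      = is.foldl (fun p j => (p.2, PySem.Int.bxor p.1 (rotl p.2 (PySem.List.pyGetD
          ((List.range 4).map (fun (j : Nat) => rot_amount (PySem.List.pyGetD inner (j : Int) 0))) (PySem.Int.mod j 4) 0)))) (l, r) := by
  induction is with
  | nil => intro l r _ _ _ _; rfl
  | cons i is ih =>
      intro l r hl0 hl hr0 hr
      simp only [List.foldl_cons, do_round]
      have hsub := pyF_bounds r (get_subkey i inner) hr0 hr
      have hx := bxor_byte l (pyF r (get_subkey i inner)) hl0 hl hsub.1 hsub.2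
      have hv : pyF r (get_subkey i inner) = rotl r (PySem.List.pyGetD
          ((List.range 4).map (fun (j : Nat) => rot_amount (PySem.List.pyGetD inner (j : Int) 0))) (PySem.Int.mod i 4) 0) := by
        rw [pyF_eq r _ hr0 hr, get_subkey, rots_get inner i]
      rw [hv] at hx
      rw [hv]
      exact ih _ _ hr0 hr hx.1 hx.2

theorem pair_eq (inner : List Int) (l r : Int) (hl0 : 0 ≤ l) (hl : l < 256) (hr0 : 0 ≤ r) (hr : r < 256) :
    feistel l r inner = roundsB l r ((List.range 4).map (fun (j : Nat) => rot_amount (PySem.List.pyGetD inner (j : Int) 0))) := by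
  rw [feistel, roundsB]
  exact fold_eq inner _ l r hl0 hl hr0 hr

theorem go_eq (i : Nat) (fb : List Int) (key : List (List Int)) (d : Bool)
    (H : ∀ j < fb.length / 2,
      0 ≤ fb.getD (2*j) 0 ∧ fb.getD (2*j) 0 < 256 ∧
      0 ≤ fb.getD (2*j+1) 0 ∧ fb.getD (2*j+1) 0 < 256) :
    goA i fb key d = goB i fb key d := by
  match fb with
  | [] => rfl
  | [x] => rfl
  | lL :: rR :: rest =>
      have h0 := H 0 (by simp only [List.length_cons]; omega)
      simp only [List.getD] at h0
      have H' : ∀ j < rest.length / 2,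
          0 ≤ rest.getD (2*j) 0 ∧ rest.getD (2*j) 0 < 256 ∧
          0 ≤ rest.getD (2*j+1) 0 ∧ rest.getD (2*j+1) 0 < 256 := by
        intro j hj
        have := H (j+1) (by simp only [List.length_cons]; omega)
        simpa [List.getD, Nat.mul_add] using this
      have ih := go_eq (i+1) rest key d H'
      simp only [goA, goB, ih]
      cases d
      · simp only [Bool.false_eq_true, if_false]
        rw [pair_eq (key.getD i []) lL rR (by tauto) (by tauto) (by tauto) (by tauto)]
      · simp only [if_pos]
        rw [pair_eq (key.getD i []) rR lL (by tauto) (by tauto) (by tauto) (by tauto)]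
termination_by fb.length

-- ===== VERDICT (by name: the statement is the Claim_ definition above) =====
theorem do_feistel_algorithm_spec : Claim_equal_do_feistel_algorithm := by
  intro fb key d _ hpre
  unfold Spec_do_feistel_algorithm do_feistel_algorithm do_feistel_algorithm_alt
  exact go_eq 0 fb key d (fun j hj => (hpre j hj).1)
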